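-- pv_equiv track=rewrite | github.com/Danielzolty/EmojiTranslator | Connect_Four/points.py | left_diag_points
-- ===== SOURCE A (Python) =====
-- def left_diag_points(row, col):
--     pts = []
--     for i in range(6):
--         if row == i or abs(row - i) > 3:
--             continue
--         if i < row:
--             diff = row - i
--             if col + diff > 6:
--                 continue
--             else:
--                 pts.append((i, col+diff))
--         else:
--             diff = i - row
--             if col - diff < 0:
--                 continue
--             else:
--                 pts.append((i, col-diff))
--     if len(pts) < 3:
--         return None
--     return pts
-- ===== SOURCE B (Python) =====
-- def left_diag_points(row, col):
--     # All candidate points lie on the anti-diagonal i + j = row + col; compute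
--     # the clipped index interval on each side in closed form, then emit points.
--     s = row + col
--     pts = [(i, s - i) for i in range(max(row - 3, 0, s - 6), min(row - 1, 5) + 1)] \
--         + [(i, s - i) for i in range(max(row + 1, 0), min(row + 3, 5, s) + 1)]
--     return pts if len(pts) >= 3 else None
-- ===== Notes on version B (the rewrite author's own statement) =====
-- stated objective: alternative
-- what changed: Instead of scanning the six rows and testing each candidate against the board bounds, B uses the invariant that all points lie on the anti-diagonal i+j=row+col: it computes the clipped index interval for the upper and lower arms in closed form with max/min, then emits the points of those two intervals directly with no per-point tests.
import Mathlib
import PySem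

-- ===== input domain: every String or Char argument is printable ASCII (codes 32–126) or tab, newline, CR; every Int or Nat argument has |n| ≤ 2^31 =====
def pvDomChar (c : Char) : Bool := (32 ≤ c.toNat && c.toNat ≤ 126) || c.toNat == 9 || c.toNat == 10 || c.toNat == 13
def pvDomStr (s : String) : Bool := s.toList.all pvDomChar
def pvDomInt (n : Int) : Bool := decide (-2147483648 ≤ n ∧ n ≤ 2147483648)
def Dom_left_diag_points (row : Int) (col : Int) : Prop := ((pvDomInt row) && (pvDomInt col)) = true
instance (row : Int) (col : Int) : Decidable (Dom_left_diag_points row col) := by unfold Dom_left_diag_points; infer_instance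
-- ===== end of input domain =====

-- B replaces A's row scan with per-point bound tests by closed-form clipped index
-- intervals on the anti-diagonal i+j=row+col (alternative decomposition); same values everywhere.

-- ===== PORT A =====
def left_diag_points (row : Int) (col : Int) : Option (List (Int × Int)) :=
  let pts := (PySem.List.pyRange 0 6 1).foldl (fun pts i =>
    if row = i ∨ (row - i).natAbs > 3 then pts
    else if i < row then
      let diff := row - i
      if col + diff > 6 then pts else pts ++ [(i, col + diff)]
    else
      let diff := i - row
      if col - diff < 0 then pts else pts ++ [(i, col - diff)]) []
  if pts.length < 3 then none else some pts

-- ===== PORT B =====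
def left_diag_points_alt (row : Int) (col : Int) : Option (List (Int × Int)) :=
  let s := row + col
  let pts :=
    (PySem.List.pyRange (max (max (row - 3) 0) (s - 6)) (min (row - 1) 5 + 1) 1).map
      (fun i => (i, s - i))
    ++ (PySem.List.pyRange (max (row + 1) 0) (min (min (row + 3) 5) s + 1) 1).map
      (fun i => (i, s - i))
  if pts.length ≥ 3 then some pts else none

-- ===== PRECONDITION & SPEC =====
def Spec_left_diag_points (row : Int) (col : Int) (out : Option (List (Int × Int))) : Prop := out = left_diag_points_alt row col
instance (row : Int) (col : Int) (out : Option (List (Int × Int))) : Decidable (Spec_left_diag_points row col out) := by unfold Spec_left_diag_points; infer_instance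

-- ===== CLAIM (what is proved, stated in full; the proofs are below) =====
def Claim_equal_left_diag_points : Prop := ∀ (row : Int) (col : Int), Dom_left_diag_points row col → Spec_left_diag_points row col (left_diag_points row col)

-- ===== LEMMAS AND PROOFS =====

-- Per-iteration contribution of A's loop body (used to linearise the foldl).
def bodyA (row col : Int) (i : Int) : List (Int × Int) :=
  if row = i ∨ (row - i).natAbs > 3 then []
  else if i < row then
    (if col + (row - i) > 6 then [] else [(i, col + (row - i))])
  else
    (if col - (i - row) < 0 then [] else [(i, col - (i - row))])

theorem flatMap_congr_mem {α β : Type} (l : List α) (f g : α → List β)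
    (h : ∀ x ∈ l, f x = g x) : l.flatMap f = l.flatMap g := by
  induction l with
  | nil => rfl
  | cons a t ih =>
    simp only [List.flatMap_cons, h a (List.mem_cons_self), ih (fun x hx => h x (List.mem_cons_of_mem a hx))]

theorem foldA (row col : Int) :
    List.foldl (fun pts i =>
      if row = i ∨ (row - i).natAbs > 3 then pts
      else if i < row then
        let diff := row - i
        if col + diff > 6 then pts else pts ++ [(i, col + diff)]
      else
        let diff := i - row
        if col - diff < 0 then pts else pts ++ [(i, col - diff)]) []
      (PySem.List.pyRange 0 6 1) =
    (PySem.List.pyRange 0 6 1).flatMap (bodyA row col) := by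
  have h1 : List.foldl (fun pts i =>
      if row = i ∨ (row - i).natAbs > 3 then pts
      else if i < row then
        let diff := row - i
        if col + diff > 6 then pts else pts ++ [(i, col + diff)]
      else
        let diff := i - row
        if col - diff < 0 then pts else pts ++ [(i, col - diff)]) []
      (PySem.List.pyRange 0 6 1) =
      List.foldl (fun pts i => pts ++ bodyA row col i) [] (PySem.List.pyRange 0 6 1) := by
    apply PySem.List.foldl_congr_mem
    intro acc x _
    simp only [bodyA]; split_ifs <;> simp
  rw [h1, PySem.List.foldl_append_eq_flatMap]
  simp

-- Generate-and-filter over a range equals the map over the clipped range.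
theorem flatMap_ite_range (f : Int → Int × Int) (lo hi : Int) (a b : Int) :
    (PySem.List.pyRange a b 1).flatMap
      (fun i => if lo ≤ i ∧ i < hi then [f i] else [])
      = (PySem.List.pyRange (max a lo) (min b hi) 1).map f := by
  by_cases h : b ≤ a
  · rw [PySem.List.pyRange_one_eq_nil h, PySem.List.pyRange_one_eq_nil (by omega)]
    simp
  · replace h : a < b := by omega
    rw [PySem.List.pyRange_one_cons h, List.flatMap_cons,
        flatMap_ite_range f lo hi (a + 1) b]
    by_cases hlo : lo ≤ a
    · by_cases hhi : a < hi
      · rw [if_pos ⟨hlo, hhi⟩,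
            show max a lo = a by omega,
            PySem.List.pyRange_one_cons (show a < min b hi by omega),
            show max (a + 1) lo = a + 1 by omega]
        simp
      · rw [if_neg (by omega),
            PySem.List.pyRange_one_eq_nil (show min b hi ≤ max (a + 1) lo by omega),
            PySem.List.pyRange_one_eq_nil (show min b hi ≤ max a lo by omega)]
        simp
    · rw [if_neg (by omega),
          show max (a + 1) lo = lo by omega, show max a lo = lo by omega]
      simp
termination_by (b - a).toNat
decreasing_by omega

theorem left_diag_points_eq_alt (row col : Int) :
    left_diag_points row col = left_diag_points_alt row col := by
  simp only [left_diag_points, left_diag_points_alt]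
  rw [foldA]
  rw [PySem.List.pyRange_one_append 0 (max 0 (min row 6)) 6 (by omega) (by omega),
      List.flatMap_append]
  have hU : (PySem.List.pyRange 0 (max 0 (min row 6)) 1).flatMap (bodyA row col)
      = (PySem.List.pyRange 0 (max 0 (min row 6)) 1).flatMap
          (fun i => if max (row - 3) (row + col - 6) ≤ i ∧ i < row
                    then [((i : Int), row + col - i)] else []) := by
    apply flatMap_congr_mem
    intro i hi
    rw [PySem.List.mem_pyRange_one] at hi
    simp only [bodyA]
    split_ifs <;> first | rfl | (exfalso; omega) | (simp; omega)
  have hL : (PySem.List.pyRange (max 0 (min row 6)) 6 1).flatMap (bodyA row col)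
      = (PySem.List.pyRange (max 0 (min row 6)) 6 1).flatMap
          (fun i => if row + 1 ≤ i ∧ i < min (row + 3) (row + col) + 1
                    then [((i : Int), row + col - i)] else []) := by
    apply flatMap_congr_mem
    intro i hi
    rw [PySem.List.mem_pyRange_one] at hi
    simp only [bodyA]
    split_ifs <;> first | rfl | (exfalso; omega) | (simp; omega)
  rw [hU, hL, flatMap_ite_range, flatMap_ite_range]
  have e1 : PySem.List.pyRange (max 0 (max (row - 3) (row + col - 6)))
        (min (max 0 (min row 6)) row) 1
      = PySem.List.pyRange (max (max (row - 3) 0) (row + col - 6))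
        (min (row - 1) 5 + 1) 1 := by
    congr 1 <;> omega
  have e2 : PySem.List.pyRange (max (max 0 (min row 6)) (row + 1))
        (min 6 (min (row + 3) (row + col) + 1)) 1
      = PySem.List.pyRange (max (row + 1) 0)
        (min (min (row + 3) 5) (row + col) + 1) 1 := by
    congr 1 <;> omega
  rw [e1, e2]
  split_ifs <;> first | rfl | omega

-- ===== VERDICT (by name: the statement is the Claim_ definition above) =====
theorem left_diag_points_spec : Claim_equal_left_diag_points := by
  intro row col _
  exact left_diag_points_eq_alt row col
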